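-- pv_equiv track=rewrite | github.com/dioncx/json-memory | json_memory/concept_map.py | get_concept_category
-- ===== SOURCE A (Python) =====
-- def get_concept_category(token: str) -> str | None:
--     """Return the semantic category of a token for grouping."""
--     categories = {
--         "identity": {"who", "name", "user", "person", "identity"},
--         "time": {"time", "timezone", "when", "clock", "gmt", "utc", "hour", "schedule"},
--         "location": {"where", "location", "server", "ip", "host", "address"},
--         "action": {"restart", "start", "stop", "build", "deploy", "run", "kill"},
--         "trading": {"trading", "trade", "bot", "strategy", "exchange", "signal", "price"},
--         "project": {"project", "repo", "library", "package", "version", "code"},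
--         "system": {"error", "fix", "log", "config", "api", "key", "database"},
--         "communication": {"message", "telegram", "notify", "chat", "cron", "schedule"},
--     }
--     for category, words in categories.items():
--         if token in words:
--             return category
--     return None
-- ===== SOURCE B (Python) =====
-- # Precomputed sorted lookup table (word, category), deduplicated with first-category
-- # priority from the original table ("schedule" -> "time"); lookup by binary search.
-- _TABLE = [
--     ("address", "location"), ("api", "system"), ("bot", "trading"),
--     ("build", "action"), ("chat", "communication"), ("clock", "time"),
--     ("code", "project"), ("config", "system"), ("cron", "communication"),
--     ("database", "system"), ("deploy", "action"), ("error", "system"),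
--     ("exchange", "trading"), ("fix", "system"), ("gmt", "time"),
--     ("host", "location"), ("hour", "time"), ("identity", "identity"),
--     ("ip", "location"), ("key", "system"), ("kill", "action"),
--     ("library", "project"), ("location", "location"), ("log", "system"),
--     ("message", "communication"), ("name", "identity"), ("notify", "communication"),
--     ("package", "project"), ("person", "identity"), ("price", "trading"),
--     ("project", "project"), ("repo", "project"), ("restart", "action"),
--     ("run", "action"), ("schedule", "time"), ("server", "location"),
--     ("signal", "trading"), ("start", "action"), ("stop", "action"),
--     ("strategy", "trading"), ("telegram", "communication"), ("time", "time"),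
--     ("timezone", "time"), ("trade", "trading"), ("trading", "trading"),
--     ("user", "identity"), ("utc", "time"), ("version", "project"),
--     ("when", "time"), ("where", "location"), ("who", "identity"),
-- ]
--
--
-- def get_concept_category(token: str) -> str | None:
--     """Return the semantic category of a token for grouping."""
--     lo, hi = 0, len(_TABLE)
--     while lo < hi:
--         mid = (lo + hi) // 2
--         word, category = _TABLE[mid]
--         if word < token:
--             lo = mid + 1
--         elif token < word:
--             hi = mid
--         else:
--             return category
--     return None
-- ===== Notes on version B (the rewrite author's own statement) =====
-- stated objective: alternative
-- what changed: A scans eight category sets linearly on every call; B looks the token up by binary search in a single precomputed sorted (word, category) table, deduplicated so the first category still wins on the overlap word 'schedule'.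
import Mathlib
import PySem

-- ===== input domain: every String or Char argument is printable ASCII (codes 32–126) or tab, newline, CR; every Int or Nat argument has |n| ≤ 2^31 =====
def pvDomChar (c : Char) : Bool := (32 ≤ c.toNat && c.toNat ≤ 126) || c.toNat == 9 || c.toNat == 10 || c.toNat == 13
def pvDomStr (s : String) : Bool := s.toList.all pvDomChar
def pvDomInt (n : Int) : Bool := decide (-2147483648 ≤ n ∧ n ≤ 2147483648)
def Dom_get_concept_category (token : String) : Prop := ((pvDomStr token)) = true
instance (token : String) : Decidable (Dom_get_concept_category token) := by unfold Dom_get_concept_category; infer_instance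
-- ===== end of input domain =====

-- B replaces A's per-call linear scan over eight category sets by binary search in one
-- precomputed sorted (word, category) table (first-category priority kept on "schedule").

-- ===== PORT A =====
def pvCatsA : List (String × PySem.Set String) :=
  [("identity", PySem.Set.ofList ["who", "name", "user", "person", "identity"]),
   ("time", PySem.Set.ofList ["time", "timezone", "when", "clock", "gmt", "utc", "hour", "schedule"]),
   ("location", PySem.Set.ofList ["where", "location", "server", "ip", "host", "address"]),
   ("action", PySem.Set.ofList ["restart", "start", "stop", "build", "deploy", "run", "kill"]),
   ("trading", PySem.Set.ofList ["trading", "trade", "bot", "strategy", "exchange", "signal", "price"]),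
   ("project", PySem.Set.ofList ["project", "repo", "library", "package", "version", "code"]),
   ("system", PySem.Set.ofList ["error", "fix", "log", "config", "api", "key", "database"]),
   ("communication", PySem.Set.ofList ["message", "telegram", "notify", "chat", "cron", "schedule"])]

def pvScanA : List (String × PySem.Set String) → String → Option String
  | [], _ => none
  | (c, ws) :: rest, t => if PySem.Set.contains ws t then some c else pvScanA rest t

def get_concept_category (token : String) : Option String := pvScanA pvCatsA token

-- ===== PORT B =====
def pvTable : List (String × String) :=
  [("address", "location"), ("api", "system"), ("bot", "trading"),
   ("build", "action"), ("chat", "communication"), ("clock", "time"),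
   ("code", "project"), ("config", "system"), ("cron", "communication"),
   ("database", "system"), ("deploy", "action"), ("error", "system"),
   ("exchange", "trading"), ("fix", "system"), ("gmt", "time"),
   ("host", "location"), ("hour", "time"), ("identity", "identity"),
   ("ip", "location"), ("key", "system"), ("kill", "action"),
   ("library", "project"), ("location", "location"), ("log", "system"),
   ("message", "communication"), ("name", "identity"), ("notify", "communication"),
   ("package", "project"), ("person", "identity"), ("price", "trading"),
   ("project", "project"), ("repo", "project"), ("restart", "action"),
   ("run", "action"), ("schedule", "time"), ("server", "location"),
   ("signal", "trading"), ("start", "action"), ("stop", "action"),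
   ("strategy", "trading"), ("telegram", "communication"), ("time", "time"),
   ("timezone", "time"), ("trade", "trading"), ("trading", "trading"),
   ("user", "identity"), ("utc", "time"), ("version", "project"),
   ("when", "time"), ("where", "location"), ("who", "identity")]

-- Python's '<' on strings, exact: lexicographic comparison of code points.
def pvLtChars : List Char → List Char → Bool
  | _, [] => false
  | [], _ :: _ => true
  | a :: as, b :: bs => if a < b then true else if b < a then false else pvLtChars as bs

-- Source B's while-loop, as fuel recursion; hi - lo strictly decreases each iteration, so
-- fuel = pvTable.length bounds the loop and the recursion is exact (totality guard only).
def pvBsearch (token : String) : Nat → Nat → Nat → Option String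
  | 0, _, _ => none
  | fuel + 1, lo, hi =>
    if lo < hi then
      let mid := (lo + hi) / 2
      match pvTable[mid]? with
      | none => none
      | some (word, category) =>
        if pvLtChars word.toList token.toList then pvBsearch token fuel (mid + 1) hi
        else if pvLtChars token.toList word.toList then pvBsearch token fuel lo mid
        else some category
    else none

def get_concept_category_alt (token : String) : Option String :=
  pvBsearch token pvTable.length 0 pvTable.length

-- ===== PRECONDITION & SPEC =====
def Spec_get_concept_category (token : String) (out : Option String) : Prop := out = get_concept_category_alt token
instance (token : String) (out : Option String) : Decidable (Spec_get_concept_category token out) := by unfold Spec_get_concept_category; infer_instance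

-- ===== CLAIM (what is proved, stated in full; the proofs are below) =====
def Claim_equal_get_concept_category : Prop := ∀ (token : String), Dom_get_concept_category token → Spec_get_concept_category token (get_concept_category token)

-- ===== LEMMAS AND PROOFS =====

-- every word occurring in either program's tables
def pvAllWords : List String := ["who", "name", "user", "person", "identity", "time", "timezone", "when", "clock", "gmt", "utc", "hour", "schedule", "where", "location", "server", "ip", "host", "address", "restart", "start", "stop", "build", "deploy", "run", "kill", "trading", "trade", "bot", "strategy", "exchange", "signal", "price", "project", "repo", "library", "package", "version", "code", "error", "fix", "log", "config", "api", "key", "database", "message", "telegram", "notify", "chat", "cron"]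

set_option maxRecDepth 8000 in
theorem pv_eq_on_all (token : String) (h : token ∈ pvAllWords) :
    get_concept_category token = get_concept_category_alt token := by
  simp only [pvAllWords, List.mem_cons, List.not_mem_nil, or_false] at h
  rcases h with rfl|rfl|rfl|rfl|rfl|rfl|rfl|rfl|rfl|rfl|rfl|rfl|rfl|rfl|rfl|rfl|rfl|rfl|rfl|rfl|rfl|rfl|rfl|rfl|rfl|rfl|rfl|rfl|rfl|rfl|rfl|rfl|rfl|rfl|rfl|rfl|rfl|rfl|rfl|rfl|rfl|rfl|rfl|rfl|rfl|rfl|rfl|rfl|rfl|rfl|rfl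
  all_goals decide

theorem pvLtChars_eq : ∀ (a b : List Char), pvLtChars a b = false → pvLtChars b a = false → a = b
  | [], [], _, _ => rfl
  | [], _ :: _, h1, _ => by simp [pvLtChars] at h1
  | _ :: _, [], _, h2 => by simp [pvLtChars] at h2
  | a :: as, b :: bs, h1, h2 => by
    by_cases hab : a < b
    · simp [pvLtChars, hab] at h1
    · by_cases hba : b < a
      · simp [pvLtChars, hba, hab] at h2
      · have : a = b := le_antisymm (not_lt.1 hba) (not_lt.1 hab)
        subst this
        simp only [pvLtChars, if_neg hab] at h1 h2
        exact congrArg (a :: ·) (pvLtChars_eq as bs h1 h2)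

theorem pvToList_inj {s t : String} (h : s.toList = t.toList) : s = t := by
  have := congrArg String.ofList h
  simpa using this

theorem pvBsearch_none (token : String) (h : ∀ p ∈ pvTable, p.1 ≠ token) :
    ∀ (fuel lo hi : Nat), pvBsearch token fuel lo hi = none := by
  intro fuel
  induction fuel with
  | zero => intro lo hi; rfl
  | succ n ih =>
    intro lo hi
    unfold pvBsearch
    by_cases hlt : lo < hi
    · simp only [hlt, if_true]
      cases hm : pvTable[(lo + hi) / 2]? with
      | none => rfl
      | some p =>
        obtain ⟨w, c⟩ := p
        have hne : w ≠ token := h _ (List.mem_of_getElem? hm)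
        by_cases h1 : pvLtChars w.toList token.toList = true
        · simp [h1, ih]
        · by_cases h2 : pvLtChars token.toList w.toList = true
          · simp [h1, h2, ih]
          · exact absurd (pvToList_inj (pvLtChars_eq w.toList token.toList
              (by simpa using h1) (by simpa using h2))) hne
    · simp [hlt]

set_option maxRecDepth 8000 in
theorem pvTable_words_sub : ∀ p ∈ pvTable, p.1 ∈ pvAllWords := by decide

set_option maxRecDepth 8000 in
theorem pv_eq_off (token : String) (h : token ∉ pvAllWords) :
    get_concept_category token = get_concept_category_alt token := by
  have hB : get_concept_category_alt token = none := by
    unfold get_concept_category_alt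
    exact pvBsearch_none token (fun p hp hpe => h (hpe ▸ pvTable_words_sub p hp)) _ _ _
  rw [hB]
  simp only [pvAllWords, List.mem_cons, List.not_mem_nil, or_false] at h
  push_neg at h
  obtain ⟨h0, h1, h2, h3, h4, h5, h6, h7, h8, h9, h10, h11, h12, h13, h14, h15, h16, h17, h18, h19, h20, h21, h22, h23, h24, h25, h26, h27, h28, h29, h30, h31, h32, h33, h34, h35, h36, h37, h38, h39, h40, h41, h42, h43, h44, h45, h46, h47, h48, h49, h50⟩ := h
  simp [get_concept_category, pvScanA, pvCatsA,
    PySem.Set.contains, PySem.Set.ofList, PySem.Set.add,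
    h0, Ne.symm h0, h1, Ne.symm h1, h2, Ne.symm h2, h3, Ne.symm h3, h4, Ne.symm h4, h5, Ne.symm h5, h6, Ne.symm h6, h7, Ne.symm h7, h8, Ne.symm h8, h9, Ne.symm h9, h10, Ne.symm h10, h11, Ne.symm h11, h12, Ne.symm h12, h13, Ne.symm h13, h14, Ne.symm h14, h15, Ne.symm h15, h16, Ne.symm h16, h17, Ne.symm h17, h18, Ne.symm h18, h19, Ne.symm h19, h20, Ne.symm h20, h21, Ne.symm h21, h22, Ne.symm h22, h23, Ne.symm h23, h24, Ne.symm h24, h25, Ne.symm h25, h26, Ne.symm h26, h27, Ne.symm h27, h28, Ne.symm h28, h29, Ne.symm h29, h30, Ne.symm h30, h31, Ne.symm h31, h32, Ne.symm h32, h33, Ne.symm h33, h34, Ne.symm h34, h35, Ne.symm h35, h36, Ne.symm h36, h37, Ne.symm h37, h38, Ne.symm h38, h39, Ne.symm h39, h40, Ne.symm h40, h41, Ne.symm h41, h42, Ne.symm h42, h43, Ne.symm h43, h44, Ne.symm h44, h45, Ne.symm h45, h46, Ne.symm h46, h47, Ne.symm h47, h48, Ne.symm h48, h49, Ne.symm h49,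 h50, Ne.symm h50]

-- ===== VERDICT (by name: the statement is the Claim_ definition above) =====
theorem get_concept_category_spec : Claim_equal_get_concept_category := by
  intro token _
  show get_concept_category token = get_concept_category_alt token
  by_cases h : token ∈ pvAllWords
  · exact pv_eq_on_all token h
  · exact pv_eq_off token h
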